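-- pv_equiv track=rewrite | github.com/981377660LMT/algorithm-study | 13_回溯算法/itertools/more-itertools/combinatorics.py | circular_shifts
-- ===== SOURCE A (Python) =====
-- import math
-- from collections import defaultdict, deque
-- from itertools import chain, combinations, cycle, repeat, starmap, zip_longest
-- from typing import Any, Iterable, Optional, Sequence, TypeVar
--
-- T = TypeVar("T")
--
-- def circular_shifts(iterable: Iterable[T], steps: int = 1):
--     """Yield the circular shifts of *iterable*.
--
--     >>> list(circular_shifts(range(4)))
--     [(0, 1, 2, 3), (1, 2, 3, 0), (2, 3, 0, 1), (3, 0, 1, 2)]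
--
--     Set *steps* to the number of places to rotate to the left
--     (or to the right if negative).  Defaults to 1.
--
--     >>> list(circular_shifts(range(4), 2))
--     [(0, 1, 2, 3), (2, 3, 0, 1)]
--
--     >>> list(circular_shifts(range(4), -1))
--     [(0, 1, 2, 3), (3, 0, 1, 2), (2, 3, 0, 1), (1, 2, 3, 0)]
--
--     """
--     buffer = deque(iterable)
--     if steps == 0:
--         raise ValueError("Steps should be a non-zero integer")
--
--     buffer.rotate(steps)
--     steps = -steps
--     n = len(buffer)
--     n //= math.gcd(n, steps)
--
--     for _ in repeat(None, n):
--         buffer.rotate(steps)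
--         yield tuple(buffer)
-- ===== SOURCE B (Python) =====
-- import math
--
--
-- def circular_shifts(iterable, steps=1):
--     """Yield the circular shifts of *iterable* (left by *steps*; right if negative).
--
--     Instead of maintaining a deque and rotating it once per yield, compute each
--     shift independently from the materialized pool by slicing at offset
--     (steps * j) % n.
--     """
--     if steps == 0:
--         raise ValueError("Steps should be a non-zero integer")
--     pool = tuple(iterable)
--     n = len(pool)
--     count = n // math.gcd(n, steps)
--     for j in range(count):
--         k = (steps * j) % n
--         yield pool[k:] + pool[:k]
-- ===== Notes on version B (the rewrite author's own statement) =====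
-- stated objective: alternative
-- what changed: B drops the mutable deque that is rotated before the loop and once per yield; it computes each shift independently from the materialized pool as pool[k:]+pool[:k] with k = (steps*j) % n, a direct closed-form indexing of the j-th rotation.
import Mathlib
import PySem

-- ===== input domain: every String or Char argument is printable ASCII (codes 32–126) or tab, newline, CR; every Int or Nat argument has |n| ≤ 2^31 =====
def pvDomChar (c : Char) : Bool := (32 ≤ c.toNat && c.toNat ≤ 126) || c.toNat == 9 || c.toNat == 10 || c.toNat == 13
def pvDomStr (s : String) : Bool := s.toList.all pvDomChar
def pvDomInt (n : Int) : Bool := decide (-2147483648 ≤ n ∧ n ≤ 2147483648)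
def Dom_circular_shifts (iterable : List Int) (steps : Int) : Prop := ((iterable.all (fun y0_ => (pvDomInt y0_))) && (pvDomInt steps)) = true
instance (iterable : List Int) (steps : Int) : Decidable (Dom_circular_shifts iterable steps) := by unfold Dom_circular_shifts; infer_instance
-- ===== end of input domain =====

-- B replaces A's repeatedly-rotated deque with independent slices pool[k:]+pool[:k], k = (steps*j) % n (alternative decomposition, same cost).


-- ===== PORT A =====
-- deque.rotate(k): right-rotate by k; exactly a left rotation by (-k) mod len (no-op on the empty deque).
def pyDequeRotate (l : List Int) (k : Int) : List Int :=
  if l.length = 0 then l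
  else l.rotate ((PySem.Int.mod (-k) (l.length : Int)).toNat)

-- the generator loop: 'for _ in repeat(None, n): buffer.rotate(steps); yield tuple(buffer)'
def circularLoopA (s : Int) : Nat → List Int → List (List Int)
  | 0, _ => []
  | m + 1, buf =>
      let buf' := pyDequeRotate buf s
      buf' :: circularLoopA s m buf'

def circular_shifts (iterable : List Int) (steps : Int) : List (List Int) :=
  let buffer := pyDequeRotate iterable steps
  let steps2 := -steps
  let n0 : Int := (buffer.length : Int)
  let n : Int := PySem.Int.floordiv n0 ((Int.gcd n0 steps2 : Nat) : Int)  -- math.gcd over ints = gcd of absolute values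
  circularLoopA steps2 n.toNat buffer

-- ===== PORT B =====
def circular_shifts_alt (iterable : List Int) (steps : Int) : List (List Int) :=
  let pool := iterable
  let n : Int := (pool.length : Int)
  let count : Int := PySem.Int.floordiv n ((Int.gcd n steps : Nat) : Int)
  (List.range count.toNat).map (fun (j : Nat) =>
    let k := PySem.Int.mod (steps * (j : Int)) n
    PySem.List.slice pool (some k) none ++ PySem.List.slice pool none (some k))

-- ===== PRECONDITION & SPEC =====
-- Pre_ excludes exactly steps = 0, where A raises ValueError (B raises too).
def Pre_circular_shifts (iterable : List Int) (steps : Int) : Prop := steps ≠ 0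
instance (iterable : List Int) (steps : Int) : Decidable (Pre_circular_shifts iterable steps) := by
  unfold Pre_circular_shifts; infer_instance

def pvWitness_circular_shifts : List Int × Int := ([0, 1, 2, 3], 2)

def Spec_circular_shifts (iterable : List Int) (steps : Int) (out : List (List Int)) : Prop := out = circular_shifts_alt iterable steps
instance (iterable : List Int) (steps : Int) (out : List (List Int)) : Decidable (Spec_circular_shifts iterable steps out) := by unfold Spec_circular_shifts; infer_instance

-- ===== CLAIM (what is proved, stated in full; the proofs are below) =====
def Claim_equal_circular_shifts : Prop := ∀ (iterable : List Int) (steps : Int), Dom_circular_shifts iterable steps → Pre_circular_shifts iterable steps → Spec_circular_shifts iterable steps (circular_shifts iterable steps)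

-- ===== LEMMAS AND PROOFS =====

-- a % n ≡ a, for ZMOD-style reasoning
theorem emod_modEq_self (a : Int) (n : Int) : (a % n) ≡ a [ZMOD n] := by
  unfold Int.ModEq
  exact Int.emod_emod_of_dvd a dvd_rfl

-- the offset A's buffer has reached before the (j+1)-st yield equals B's slicing offset, mod n
theorem key_offset (steps : Int) (n : Nat) (hn : 0 < n) (j : Nat) :
    (((-steps) % (n : Int)).toNat + (j + 1) * ((steps % (n : Int)).toNat)) % n
      = ((steps * (j : Int)) % (n : Int)).toNat := by
  have hnz : (0:Int) < (n:Int) := by exact_mod_cast hn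
  have h1 : 0 ≤ (-steps) % (n : Int) := Int.emod_nonneg _ (by omega)
  have h2 : 0 ≤ steps % (n : Int) := Int.emod_nonneg _ (by omega)
  have h3 : 0 ≤ (steps * (j : Int)) % (n : Int) := Int.emod_nonneg _ (by omega)
  apply Nat.cast_injective (R := Int)
  push_cast [Int.toNat_of_nonneg h1, Int.toNat_of_nonneg h2, Int.toNat_of_nonneg h3]
  have hmod : ((-steps) % (n : Int) + ((j : Int) + 1) * (steps % (n : Int)))
      ≡ (-steps + ((j : Int) + 1) * steps) [ZMOD (n : Int)] :=
    (emod_modEq_self (-steps) _).add ((emod_modEq_self steps _).mul_left _)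
  have : (-steps + ((j : Int) + 1) * steps) = steps * (j : Int) := by ring
  rw [this] at hmod
  exact hmod

theorem circularLoopA_eq (s : Int) :
    ∀ (m : Nat) (buf : List Int), buf ≠ [] →
      circularLoopA s m buf =
        (List.range m).map
          (fun j => buf.rotate ((j + 1) * ((PySem.Int.mod (-s) (buf.length : Int)).toNat))) := by
  intro m
  induction m with
  | zero => intro buf _; simp [circularLoopA]
  | succ m ih =>
    intro buf hbuf
    have hlen0 : ¬ buf.length = 0 := by simpa [List.length_eq_zero_iff] using hbuf
    have hrot : pyDequeRotate buf s
        = buf.rotate ((PySem.Int.mod (-s) (buf.length : Int)).toNat) := by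
      simp [pyDequeRotate, hlen0]
    have hne' : buf.rotate ((PySem.Int.mod (-s) (buf.length : Int)).toNat) ≠ [] := by
      intro h
      exact hbuf (by simpa using congrArg List.length h)
    have hlen' : (buf.rotate ((PySem.Int.mod (-s) (buf.length : Int)).toNat)).length
        = buf.length := List.length_rotate _ _
    rw [List.range_succ_eq_map]
    simp only [circularLoopA, hrot, List.map_cons, List.map_map]
    refine congrArg₂ List.cons ?_ ?_
    · rw [Nat.zero_add, Nat.one_mul]
    · rw [ih _ hne']
      apply List.map_congr_left
      intro j _
      simp only [Function.comp, hlen', List.rotate_rotate]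
      congr 1
      simp only [Nat.succ_eq_add_one]
      ring

-- ===== VERDICT (by name: the statement is the Claim_ definition above) =====
theorem circular_shifts_spec : Claim_equal_circular_shifts := by
  intro iterable steps _ hs
  unfold Spec_circular_shifts circular_shifts circular_shifts_alt
  by_cases hnil : iterable = []
  · subst hnil
    have habs : (0:Int) < |steps| := abs_pos.mpr hs
    simp [pyDequeRotate, circularLoopA, PySem.Int.floordiv_eq_ediv_of_pos habs]
  ·
    have hnpos : 0 < iterable.length := List.length_pos_iff.mpr hnil
    have hnz : (0:Int) < (iterable.length : Int) := by exact_mod_cast hnpos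
    have hmodeq : ∀ a : Int, PySem.Int.mod a (iterable.length : Int) = a % (iterable.length : Int) :=
      fun a => PySem.Int.mod_eq_emod_of_pos hnz
    have hlen0 : ¬ iterable.length = 0 := by omega
    have hrot0 : pyDequeRotate iterable steps
        = iterable.rotate (((-steps) % (iterable.length : Int)).toNat) := by
      simp [pyDequeRotate, hlen0, hmodeq]
    have hlenrot : (iterable.rotate (((-steps) % (iterable.length : Int)).toNat)).length
        = iterable.length := List.length_rotate _ _
    have hnerot : iterable.rotate (((-steps) % (iterable.length : Int)).toNat) ≠ [] := by
      intro h
      exact hnil (by simpa using congrArg List.length h)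
    rw [hrot0, circularLoopA_eq _ _ _ hnerot, hlenrot]
    simp only [neg_neg, hmodeq, Int.gcd_neg]
    apply List.map_congr_left
    intro j hj
    -- the element of B: slices = drop ++ take = rotate
    have hk0 : 0 ≤ (steps * (j : Int)) % (iterable.length : Int) :=
      Int.emod_nonneg _ (by omega)
    have hklt : ((steps * (j : Int)) % (iterable.length : Int)).toNat < iterable.length := by
      have := Int.emod_lt_of_pos (steps * (j : Int)) hnz
      omega
    rw [PySem.List.slice_from iterable hk0, PySem.List.slice_to iterable hk0]
    rw [← List.rotate_eq_drop_append_take (le_of_lt hklt)]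
    rw [List.rotate_rotate]
    rw [← List.rotate_mod iterable
      (((-steps) % (iterable.length : Int)).toNat + (j + 1) * ((steps % (iterable.length : Int)).toNat))]
    rw [key_offset steps iterable.length hnpos j]
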